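-- pv_equiv track=rewrite | github.com/elicassion/SE305-Functional-Dependencies | compute_F_closure.py | delete_extraneous_attr
-- ===== SOURCE A (Python) =====
-- def attr_closure(r, F):
--     res = [i for i in r]
--     change = True
--     while change:
--         flag = False
--         for k, v in F:
--             if set(res) >= set(k):
--                 for i in v:
--                     if i not in res:
--                         res += i
--                         flag = True
--         change = flag
--     return res
--
-- def test_extraneous_attr_lhs(alpha, k, v, Fc):
--     remain = ''.join(set(k) - set(alpha))
--     # print ('remain:', remain)
--     remain_closure = attr_closure(remain, Fc)
--     if set(remain_closure) >= set(v):
--         return True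
--     else:
--         return False
--
-- def test_extraneous_attr_rhs(beta, k, v, Fc):
--     # print (Fc)
--     # print (beta, k, v)
--     Fdot = (set(Fc) - set([(k,v)])) | set([(k, ''.join(set(v)-set(beta)))])
--     # print (Fdot)
--     k_closure = attr_closure(k, Fdot)
--     if beta in k_closure:
--         return True
--     else:
--         return False
--
-- def delete_extraneous_attr(Fc):
--     nfc = []
--     change = False
--     for k,v in Fc:
--         nk = ''
--         for alpha in k:
--             if not test_extraneous_attr_lhs(alpha, k, v, Fc):
--                 nk += alpha
--             else:
--                 change = True
--         nv = ''
--         for beta in v: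
--             if not test_extraneous_attr_rhs(beta, k, v, Fc):
--                 nv += beta
--             else:
--                 change = True
--         nfc.append((nk, nv))
--     return nfc, change
-- ===== SOURCE B (Python) =====
-- def _closure(r, F):
--     # linear-style worklist attribute closure: returns the SET of attributes
--     S = set(r)
--     queue = list(dict.fromkeys(r))
--     for k, v in F:
--         if not k:  # rule with empty lhs is immediately applicable
--             for x in v:
--                 if x not in S:
--                     S.add(x)
--                     queue.append(x)
--     while queue:
--         c = queue.pop()
--         for k, v in F:
--             if c in k and set(k) <= S:
--                 for x in v:
--                     if x not in S:
--                         S.add(x)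
--                         queue.append(x)
--     return S
--
--
-- def delete_extraneous_attr(Fc):
--     nfc = []
--     change = False
--     for k, v in Fc:
--         nk = ''.join(a for a in k
--                      if not set(v) <= _closure([c for c in k if c != a], Fc))
--         nv = ''
--         for b in v:
--             Fdot = [p for p in Fc if p != (k, v)]
--             Fdot.append((k, ''.join(c for c in v if c != b)))
--             if b not in _closure(k, Fdot):
--                 nv += b
--         change = change or nk != k or nv != v
--         nfc.append((nk, nv))
--     return nfc, change
-- ===== Notes on version B (the rewrite author's own statement) =====
-- stated objective: alternative
-- what changed: Replaces the repeated full-pass fixpoint attribute-closure (rescanning all FDs until a pass adds nothing) with a worklist closure: a queue of newly-added attributes, each popped once and used to trigger only now-satisfiable FDs, with set-membership instead of list scans; the outer function builds the reduced sides as filters and derives the change flag by comparison instead of threading it through every test.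
import Mathlib
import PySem

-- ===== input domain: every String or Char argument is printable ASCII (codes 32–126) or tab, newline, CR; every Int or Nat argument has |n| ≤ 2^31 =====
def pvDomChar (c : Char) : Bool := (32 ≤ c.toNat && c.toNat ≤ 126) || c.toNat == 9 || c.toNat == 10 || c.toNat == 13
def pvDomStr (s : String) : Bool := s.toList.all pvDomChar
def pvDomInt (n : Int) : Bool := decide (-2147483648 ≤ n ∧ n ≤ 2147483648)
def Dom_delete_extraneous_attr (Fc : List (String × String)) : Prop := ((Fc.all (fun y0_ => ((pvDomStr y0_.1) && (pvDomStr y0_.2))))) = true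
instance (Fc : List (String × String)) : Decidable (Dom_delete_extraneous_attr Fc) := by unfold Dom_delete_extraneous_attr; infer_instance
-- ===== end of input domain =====

-- B replaces A's repeated-full-pass fixpoint attribute closure by a worklist closure
-- (each attribute is queued and processed once) and builds the reduced FDs as filters:
-- a different algorithm of comparable cost (objective: alternative).

-- ===== PORT A =====
-- inner 'for i in v: if i not in res: res += i; flag = True' of attr_closure
def acAdd (st : List Char × Bool) (v : List Char) : List Char × Bool :=
  v.foldl (fun st i => if st.1.contains i then st else (st.1 ++ [i], true)) st

-- one body of the 'while change' loop of attr_closure ('for k, v in F: …'), flag starts False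
def acPass (F : List (String × String)) (res : List Char) : List Char × Bool :=
  F.foldl (fun st kv =>
    if kv.1.toList.all (fun a => st.1.contains a) then acAdd st kv.2.toList else st)
    (res, false)

-- the 'while change' loop (fuel only makes the recursion structural; F.length+1 passes provably suffice)
def acLoop (F : List (String × String)) : Nat → List Char → List Char
  | 0, res => res
  | fuel+1, res =>
      let p := acPass F res
      if p.2 then acLoop F fuel p.1 else p.1

-- attr_closure(r, F)
def attr_closure_port (r : List Char) (F : List (String × String)) : List Char :=
  acLoop F (F.length + 1) r

-- test_extraneous_attr_lhs(alpha, k, v, Fc)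
def testLhs (Fc : List (String × String)) (k v : String) (alpha : Char) : Bool :=
  let remain : PySem.Set Char :=
    PySem.Set.diff (PySem.Set.ofList k.toList) (PySem.Set.ofList [alpha])
  let rc := attr_closure_port remain Fc
  v.toList.all (fun c => rc.contains c)

-- test_extraneous_attr_rhs(beta, k, v, Fc); ''.join over a set is consumed only through
-- closure MEMBERSHIP downstream, so the insertion order used here is exact for the result
def testRhs (Fc : List (String × String)) (k v : String) (beta : Char) : Bool :=
  let vmb : PySem.Set Char :=
    PySem.Set.diff (PySem.Set.ofList v.toList) (PySem.Set.ofList [beta])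
  let Fdot : PySem.Set (String × String) :=
    PySem.Set.union (PySem.Set.diff (PySem.Set.ofList Fc) (PySem.Set.ofList [(k, v)]))
      (PySem.Set.ofList [(k, String.ofList vmb)])
  (attr_closure_port k.toList Fdot).contains beta

def delete_extraneous_attr (Fc : List (String × String)) : (List (String × String)) × Bool :=
  Fc.foldl (fun (st : List (String × String) × Bool) kv =>
    let p1 := kv.1.toList.foldl (fun (q : List Char × Bool) a =>
        if !(testLhs Fc kv.1 kv.2 a) then (q.1 ++ [a], q.2) else (q.1, true)) ([], st.2)
    let p2 := kv.2.toList.foldl (fun (q : List Char × Bool) b =>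
        if !(testRhs Fc kv.1 kv.2 b) then (q.1 ++ [b], q.2) else (q.1, true)) ([], p1.2)
    (st.1 ++ [(String.ofList p1.1, String.ofList p2.1)], p2.2)) ([], false)

-- ===== PORT B =====
-- 'for x in v: if x not in S: S.add(x); queue.append(x)'
def wlFire (st : List Char × List Char) (v : List Char) : List Char × List Char :=
  v.foldl (fun st x => if st.1.contains x then st else (st.1 ++ [x], st.2 ++ [x])) st

-- the 'for k, v in F' body run for one popped attribute c
def wlScan (F : List (String × String)) (c : Char) (st : List Char × List Char) : List Char × List Char :=
  F.foldl (fun st kv =>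
    if kv.1.toList.contains c && kv.1.toList.all (fun a => st.1.contains a) then
      wlFire st kv.2.toList
    else st) st

-- 'while queue: c = queue.pop(); …' (fuel only makes the recursion structural; it provably suffices)
def wlLoop (F : List (String × String)) : Nat → List Char × List Char → List Char
  | 0, st => st.1
  | fuel+1, st =>
      match st.2.getLast? with
      | none => st.1
      | some c => wlLoop F fuel (wlScan F c (st.1, st.2.dropLast))

-- initial 'for k, v in F: if not k: …' seeding of empty-lhs FDs
def wlSeed (F : List (String × String)) (st : List Char × List Char) : List Char × List Char :=
  F.foldl (fun st kv => if kv.1.toList.isEmpty then wlFire st kv.2.toList else st) st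

-- _closure(r, F): worklist attribute closure (returns the closure as a set)
def closure_alt (r : List Char) (F : List (String × String)) : List Char :=
  let s0 := PySem.List.dedup r
  wlLoop F (r.length + (F.flatMap (fun kv => kv.2.toList)).length + 1) (wlSeed F (s0, s0))

def lhsKeep (Fc : List (String × String)) (k v : String) (a : Char) : Bool :=
  let cl := closure_alt (k.toList.filter (fun x => decide (x ≠ a))) Fc
  !(v.toList.all (fun c => cl.contains c))

def rhsKeep (Fc : List (String × String)) (k v : String) (b : Char) : Bool :=
  let Fdot := Fc.filter (fun p => decide (p ≠ (k, v)))
      ++ [(k, String.ofList (v.toList.filter (fun x => decide (x ≠ b))))]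
  !((closure_alt k.toList Fdot).contains b)

def delete_extraneous_attr_alt (Fc : List (String × String)) : (List (String × String)) × Bool :=
  Fc.foldl (fun (st : List (String × String) × Bool) kv =>
    let nk := String.ofList (kv.1.toList.filter (fun a => lhsKeep Fc kv.1 kv.2 a))
    let nv := String.ofList (kv.2.toList.filter (fun b => rhsKeep Fc kv.1 kv.2 b))
    (st.1 ++ [(nk, nv)], st.2 || decide (nk ≠ kv.1) || decide (nv ≠ kv.2))) ([], false)

-- ===== PRECONDITION & SPEC =====
def Spec_delete_extraneous_attr (Fc : List (String × String)) (out : (List (String × String)) × Bool) : Prop := out = delete_extraneous_attr_alt Fc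
instance (Fc : List (String × String)) (out : (List (String × String)) × Bool) : Decidable (Spec_delete_extraneous_attr Fc out) := by unfold Spec_delete_extraneous_attr; infer_instance

-- ===== CLAIM (what is proved, stated in full; the proofs are below) =====
def Claim_equal_delete_extraneous_attr : Prop := ∀ (Fc : List (String × String)), Dom_delete_extraneous_attr Fc → Spec_delete_extraneous_attr Fc (delete_extraneous_attr Fc)

-- ===== LEMMAS AND PROOFS =====

-- attributes derivable from r under the FDs F (the mathematical attribute closure)
inductive Deriv (r : List Char) (F : List (String × String)) : Char → Prop
  | base : ∀ {c}, c ∈ r → Deriv r F c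
  | step : ∀ {k v : String} {c}, (k, v) ∈ F → (∀ a ∈ k.toList, Deriv r F a) → c ∈ v.toList →
      Deriv r F c

def ClosedPred (F : List (String × String)) (D : Char → Prop) : Prop :=
  ∀ kv ∈ F, (∀ a ∈ kv.1.toList, D a) → ∀ c ∈ kv.2.toList, D c

def ClosedList (F : List (String × String)) (S : List Char) : Prop :=
  ClosedPred F (fun c => c ∈ S)

lemma Deriv_closedPred (r : List Char) (F : List (String × String)) :
    ClosedPred F (Deriv r F) := fun kv hkv hprem _ hc => Deriv.step (k := kv.1) (v := kv.2) hkv hprem hc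

lemma Deriv_min {r : List Char} {F : List (String × String)} {D : Char → Prop}
    (hcl : ClosedPred F D) (hbase : ∀ x ∈ r, D x) : ∀ c, Deriv r F c → D c := by
  intro c h
  induction h with
  | base h => exact hbase _ h
  | step hkv _ hc ih => exact hcl _ hkv ih _ hc

lemma Deriv_mono {r₁ r₂ : List Char} {F₁ F₂ : List (String × String)}
    (hr : ∀ x ∈ r₁, x ∈ r₂)
    (hF : ∀ kv ∈ F₁, ∃ kv' ∈ F₂, (∀ a ∈ kv'.1.toList, a ∈ kv.1.toList) ∧
          (∀ c ∈ kv.2.toList, c ∈ kv'.2.toList)) :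
    ∀ c, Deriv r₁ F₁ c → Deriv r₂ F₂ c := by
  intro c h
  induction h with
  | base h => exact Deriv.base (hr _ h)
  | @step k v c hkv _ hc ih =>
      obtain ⟨kv', hkv', hsub, hsup⟩ := hF _ hkv
      exact Deriv.step (k := kv'.1) (v := kv'.2) (by simpa using hkv')
        (fun a ha => ih _ (hsub _ ha)) (hsup _ hc)

lemma acAdd_shape (v : List Char) : ∀ st : List Char × Bool, ∃ t : List Char,
    acAdd st v = (st.1 ++ t, st.2 || !t.isEmpty)
    ∧ (∀ x ∈ t, x ∉ st.1 ∧ x ∈ v)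
    ∧ (∀ x ∈ v, x ∈ st.1 ++ t) := by
  induction v with
  | nil => intro st; exact ⟨[], by simp [acAdd], by simp, by simp⟩
  | cons x v ih =>
    intro st
    by_cases hx : x ∈ st.1
    · obtain ⟨t, h1, h2, h3⟩ := ih st
      have hstep : acAdd st (x :: v) = acAdd st v := by
        simp [acAdd, List.foldl_cons, hx]
      refine ⟨t, hstep ▸ h1, fun y hy => ⟨(h2 y hy).1, by simp [(h2 y hy).2]⟩, ?_⟩
      intro y hy
      rcases List.mem_cons.1 hy with hy | hy
      · subst hy; simp [hx]
      · exact h3 y hy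
    · obtain ⟨t, h1, h2, h3⟩ := ih (st.1 ++ [x], true)
      have hstep : acAdd st (x :: v) = acAdd (st.1 ++ [x], true) v := by
        simp [acAdd, List.foldl_cons, hx]
      refine ⟨x :: t, ?_, ?_, ?_⟩
      · rw [hstep, h1]; simp
      · intro y hy
        rcases List.mem_cons.1 hy with hy | hy
        · subst hy; exact ⟨hx, by simp⟩
        · have := h2 y hy; simp at this
          exact ⟨this.1.1, by simp [this.2]⟩
      · intro y hy
        rcases List.mem_cons.1 hy with hy | hy
        · subst hy; simp
        · have := h3 y hy; simp at this ⊢; tauto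
lemma acPass_go (F : List (String × String)) : ∀ (res : List Char) (flag : Bool),
    ∃ t : List Char,
    F.foldl (fun st kv => if kv.1.toList.all (fun a => st.1.contains a) then acAdd st kv.2.toList else st) (res, flag)
      = (res ++ t, flag || !t.isEmpty)
    ∧ (∀ x ∈ t, x ∉ res ∧ x ∈ F.flatMap (fun kv => kv.2.toList))
    ∧ (∀ D : Char → Prop, (∀ x ∈ res, D x) → ClosedPred F D → ∀ x ∈ t, D x)
    ∧ (t = [] → ClosedList F res)
    ∧ (t ≠ [] → ∃ kv ∈ F, (∃ c ∈ kv.2.toList, c ∉ res) ∧ (∀ c ∈ kv.2.toList, c ∈ res ++ t)) := by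
  induction F with
  | nil =>
      intro res flag
      exact ⟨[], by simp, by simp, by simp, fun _ => by rintro kv h; simp at h, by simp⟩
  | cons kv F ih =>
      intro res flag
      by_cases hc : kv.1.toList.all (fun a => res.contains a) = true
      · -- head fires
        obtain ⟨t0, g1, g2, g3⟩ := acAdd_shape kv.2.toList (res, flag)
        obtain ⟨t1, h1, h2, h3, h4, h5⟩ := ih (res ++ t0) (flag || !t0.isEmpty)
        refine ⟨t0 ++ t1, ?_, ?_, ?_, ?_, ?_⟩
        · rw [List.foldl_cons, if_pos hc, g1, h1]
          cases t0 <;> cases t1 <;> simp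
        · intro x hx
          rcases List.mem_append.1 hx with hx | hx
          · exact ⟨(g2 x hx).1, by simp; exact Or.inl (g2 x hx).2⟩
          · have := (h2 x hx).1
            refine ⟨fun hm => this (by simp [hm]), ?_⟩
            have := (h2 x hx).2; simp at this ⊢; tauto
        · intro D hres hcl x hx
          have hclF : ClosedPred F D := fun p hp => hcl p (by simp [hp])
          have ht0 : ∀ x ∈ t0, D x := by
            intro y hy
            have hvD : ∀ c ∈ kv.2.toList, D c := by
              refine hcl kv (by simp) ?_
              intro a ha
              have : a ∈ res := by
                have := List.all_eq_true.1 hc a ha; simpa using this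
              exact hres a this
            exact hvD y (g2 y hy).2
          rcases List.mem_append.1 hx with hx | hx
          · exact ht0 x hx
          · exact h3 D (by intro y hy; rcases List.mem_append.1 hy with hy | hy
                           · exact hres y hy
                           · exact ht0 y hy) hclF x hx
        · intro hemp
          obtain ⟨ht0, ht1⟩ := List.append_eq_nil_iff.1 hemp
          subst ht0
          have hclF := h4 ht1
          rintro p hp
          rcases List.mem_cons.1 hp with hp | hp
          · subst hp
            intro hprem c hcv
            have := g3 c hcv; simpa using this
          · intro hprem c hcv
            have := hclF p hp (by simpa using hprem) c hcv
            simpa using this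
        · intro hne
          rcases List.eq_nil_or_concat t0 with ht0 | ⟨_, _, ht0⟩
          · subst ht0
            have : t1 ≠ [] := by simpa using hne
            obtain ⟨p, hp, ⟨c, hcv, hcr⟩, hall⟩ := h5 this
            refine ⟨p, by simp [hp], ⟨c, hcv, fun hm => hcr (by simp [hm])⟩, ?_⟩
            intro d hd
            have := hall d hd; simp at this ⊢; tauto
          · have ht0ne : t0 ≠ [] := by simp [ht0]
            obtain ⟨y, hy⟩ := List.exists_mem_of_ne_nil t0 ht0ne
            refine ⟨kv, by simp, ⟨y, (g2 y hy).2, (g2 y hy).1⟩, ?_⟩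
            intro d hd
            have := g3 d hd; simp at this ⊢; tauto
      · -- head does not fire
        obtain ⟨t, h1, h2, h3, h4, h5⟩ := ih res flag
        refine ⟨t, ?_, ?_, ?_, ?_, ?_⟩
        · rw [List.foldl_cons, if_neg hc]; exact h1
        · intro x hx; exact ⟨(h2 x hx).1, by have := (h2 x hx).2; simp at this ⊢; tauto⟩
        · intro D hres hcl x hx
          exact h3 D hres (fun p hp => hcl p (by simp [hp])) x hx
        · intro hemp p hp
          rcases List.mem_cons.1 hp with hp | hp
          · subst hp
            intro hprem c hcv
            exfalso
            apply hc
            refine List.all_eq_true.2 ?_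
            intro a ha; simpa using hprem a ha
          · exact h4 hemp p hp
        · intro hne
          obtain ⟨p, hp, hw, hall⟩ := h5 hne
          exact ⟨p, by simp [hp], hw, hall⟩
lemma pv_filter_len_mono {α} (p q : α → Bool) : ∀ (l : List α), (∀ x ∈ l, q x = true → p x = true) →
    (l.filter q).length ≤ (l.filter p).length := by
  intro l
  induction l with
  | nil => intro _; simp
  | cons x l ih =>
      intro h
      have ht := ih (fun y hy => h y (by simp [hy]))
      by_cases hq : q x = true
      · rw [List.filter_cons_of_pos hq, List.filter_cons_of_pos (h x (by simp) hq)]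
        simpa using ht
      · rw [List.filter_cons_of_neg (by simpa using hq)]
        cases hp : p x
        · rw [List.filter_cons_of_neg (by simp [hp])]; exact ht
        · rw [List.filter_cons_of_pos hp]; simp; omega

lemma pv_filter_len_lt {α} (p q : α → Bool) : ∀ (l : List α) (a : α), a ∈ l →
    (∀ x ∈ l, q x = true → p x = true) → p a = true → q a = false →
    (l.filter q).length < (l.filter p).length := by
  intro l
  induction l with
  | nil => intro a ha; simp at ha
  | cons x l ih =>
      intro a ha h hp hq
      have hmono := pv_filter_len_mono p q l (fun y hy => h y (by simp [hy]))
      rcases List.mem_cons.1 ha with rfl | ha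
      · rw [List.filter_cons_of_pos hp, List.filter_cons_of_neg (by simp [hq])]
        simpa using Nat.lt_succ_of_le hmono
      · have ht := ih a ha (fun y hy => h y (by simp [hy])) hp hq
        by_cases hqx : q x = true
        · rw [List.filter_cons_of_pos hqx, List.filter_cons_of_pos (h x (by simp) hqx)]
          simpa using ht
        · rw [List.filter_cons_of_neg (by simpa using hqx)]
          cases hpx : p x
          · rw [List.filter_cons_of_neg (by simp [hpx])]; exact ht
          · rw [List.filter_cons_of_pos hpx]; simp; omega
def mUnspent (F : List (String × String)) (res : List Char) : Nat :=
  (F.filter (fun kv => !(kv.2.toList.all (fun c => res.contains c)))).length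

lemma acLoop_spec (F : List (String × String)) : ∀ (fuel : Nat) (res : List Char),
    mUnspent F res < fuel →
    (∀ x ∈ res, x ∈ acLoop F fuel res) ∧ ClosedList F (acLoop F fuel res) ∧
    (∀ D : Char → Prop, (∀ x ∈ res, D x) → ClosedPred F D → ∀ x ∈ acLoop F fuel res, D x) := by
  intro fuel
  induction fuel with
  | zero => intro res h; omega
  | succ n ih =>
      intro res h
      obtain ⟨t, h1, h2, h3, h4, h5⟩ := acPass_go F res false
      have hpass : acPass F res = (res ++ t, !t.isEmpty) := by
        rw [acPass, h1]; simp
      rcases List.eq_nil_or_concat t with rfl | ⟨_, _, hcat⟩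
      · have hres : acLoop F (n+1) res = res := by
          simp [acLoop, hpass]
        rw [hres]
        exact ⟨fun x hx => hx, by simpa using h4 rfl, fun D hD _ => hD⟩
      · have htne : t ≠ [] := by simp [hcat]
        have hflag : (!t.isEmpty) = true := by simp [hcat]
        have hres : acLoop F (n+1) res = acLoop F n (res ++ t) := by
          simp [acLoop, hpass, hflag]
        obtain ⟨kv, hkv, ⟨c, hcv, hcr⟩, hall⟩ := h5 htne
        have hm : mUnspent F (res ++ t) < mUnspent F res := by
          apply pv_filter_len_lt _ _ F kv hkv
          · intro x _ hq
            simp only [Bool.not_eq_true'] at hq ⊢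
            rcases List.all_eq_false.1 hq with ⟨d, hd, hdc⟩
            refine List.all_eq_false.2 ⟨d, hd, ?_⟩
            simp at hdc ⊢
            exact hdc.1
          · simp only [Bool.not_eq_true']
            refine List.all_eq_false.2 ⟨c, hcv, by simpa using hcr⟩
          · have : kv.2.toList.all (fun c => (res ++ t).contains c) = true := by
              refine List.all_eq_true.2 ?_
              intro d hd; simpa using hall d hd
            simp only [this, Bool.not_true]
        obtain ⟨m1, m2, m3⟩ := ih (res ++ t) (by omega)
        rw [hres]
        refine ⟨fun x hx => m1 x (by simp [hx]), m2, ?_⟩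
        intro D hD hcl x hx
        refine m3 D ?_ hcl x hx
        intro y hy
        rcases List.mem_append.1 hy with hy | hy
        · exact hD y hy
        · exact h3 D hD hcl y hy

lemma attr_mem (r : List Char) (F : List (String × String)) :
    ∀ c, c ∈ attr_closure_port r F ↔ Deriv r F c := by
  have hm : mUnspent F r < F.length + 1 := by
    have := List.length_filter_le (fun kv => !(kv.2.toList.all (fun c => r.contains c))) F
    simp only [mUnspent]; omega
  obtain ⟨m1, m2, m3⟩ := acLoop_spec F (F.length + 1) r hm
  intro c
  constructor
  · intro hc
    exact m3 (Deriv r F) (fun x hx => Deriv.base hx) (Deriv_closedPred r F) c hc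
  · intro hc
    exact Deriv_min (D := fun c => c ∈ attr_closure_port r F) m2 (fun x hx => m1 x hx) c hc
lemma wlFire_shape (v : List Char) : ∀ st : List Char × List Char, ∃ t : List Char,
    wlFire st v = (st.1 ++ t, st.2 ++ t)
    ∧ t.Nodup
    ∧ (∀ x ∈ t, x ∉ st.1 ∧ x ∈ v)
    ∧ (∀ x ∈ v, x ∈ st.1 ++ t) := by
  induction v with
  | nil => intro st; exact ⟨[], by simp [wlFire], by simp, by simp, by simp⟩
  | cons x v ih =>
    intro st
    by_cases hx : x ∈ st.1
    · obtain ⟨t, h1, h2, h3, h4⟩ := ih st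
      have hstep : wlFire st (x :: v) = wlFire st v := by
        simp [wlFire, List.foldl_cons, hx]
      refine ⟨t, hstep ▸ h1, h2, fun y hy => ⟨(h3 y hy).1, by simp [(h3 y hy).2]⟩, ?_⟩
      intro y hy
      rcases List.mem_cons.1 hy with rfl | hy
      · simp [hx]
      · exact h4 y hy
    · obtain ⟨t, h1, h2, h3, h4⟩ := ih (st.1 ++ [x], st.2 ++ [x])
      have hstep : wlFire st (x :: v) = wlFire (st.1 ++ [x], st.2 ++ [x]) v := by
        simp [wlFire, List.foldl_cons, hx]
      refine ⟨x :: t, ?_, ?_, ?_, ?_⟩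
      · rw [hstep, h1]; simp
      · refine List.nodup_cons.2 ⟨?_, h2⟩
        intro hxt
        exact (h3 x hxt).1 (by simp)
      · intro y hy
        rcases List.mem_cons.1 hy with rfl | hy
        · exact ⟨hx, by simp⟩
        · have := h3 y hy; simp at this
          exact ⟨this.1.1, by simp [this.2]⟩
      · intro y hy
        rcases List.mem_cons.1 hy with rfl | hy
        · simp
        · have := h4 y hy; simp at this ⊢; tauto

lemma wlScan_shape (F : List (String × String)) (c : Char) :
    ∀ st : List Char × List Char, ∃ t : List Char,
    wlScan F c st = (st.1 ++ t, st.2 ++ t)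
    ∧ t.Nodup
    ∧ (∀ x ∈ t, x ∉ st.1 ∧ x ∈ F.flatMap (fun kv => kv.2.toList))
    ∧ (∀ D : Char → Prop, (∀ x ∈ st.1, D x) → ClosedPred F D → ∀ x ∈ t, D x)
    ∧ (∀ kv ∈ F, c ∈ kv.1.toList → (∀ a ∈ kv.1.toList, a ∈ st.1) →
        ∀ x ∈ kv.2.toList, x ∈ st.1 ++ t) := by
  induction F with
  | nil =>
      intro st
      exact ⟨[], by simp [wlScan], by simp, by simp, by simp, by simp⟩
  | cons kv F ih =>
      intro st
      by_cases hc : (kv.1.toList.contains c && kv.1.toList.all (fun a => st.1.contains a)) = true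
      · obtain ⟨t0, g1, g2, g3, g4⟩ := wlFire_shape kv.2.toList st
        obtain ⟨t1, h1, h2, h3, h4, h5⟩ := ih (st.1 ++ t0, st.2 ++ t0)
        have hstep : wlScan (kv :: F) c st = wlScan F c (st.1 ++ t0, st.2 ++ t0) := by
          simp only [wlScan, List.foldl_cons, if_pos hc, g1]
        refine ⟨t0 ++ t1, ?_, ?_, ?_, ?_, ?_⟩
        · rw [hstep, h1]; simp
        · rw [List.nodup_append]
          refine ⟨g2, h2, ?_⟩
          intro a ha b hb e
          exact (h3 b hb).1 (by simp [← e, ha])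
        · intro x hx
          rcases List.mem_append.1 hx with hx | hx
          · exact ⟨(g3 x hx).1, by simp; exact Or.inl (g3 x hx).2⟩
          · have hni := (h3 x hx).1
            refine ⟨fun hm => hni (by simp [hm]), ?_⟩
            have := (h3 x hx).2; simp at this ⊢; tauto
        · intro D hD hcl x hx
          have hclF : ClosedPred F D := fun p hp => hcl p (by simp [hp])
          have ht0 : ∀ x ∈ t0, D x := by
            intro y hy
            have hvD : ∀ d ∈ kv.2.toList, D d := by
              refine hcl kv (by simp) ?_
              intro a ha
              have hall := ((Bool.and_eq_true _ _).mp hc).2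
              have : a ∈ st.1 := by simpa using List.all_eq_true.1 hall a ha
              exact hD a this
            exact hvD y (g3 y hy).2
          rcases List.mem_append.1 hx with hx | hx
          · exact ht0 x hx
          · refine h4 D ?_ hclF x hx
            intro y hy
            rcases List.mem_append.1 hy with hy | hy
            · exact hD y hy
            · exact ht0 y hy
        · intro p hp hcp hprem
          rcases List.mem_cons.1 hp with rfl | hp
          · intro x hx
            have := g4 x hx; simp at this ⊢; tauto
          · intro x hx
            have := h5 p hp hcp (fun a ha => by simp [hprem a ha]) x hx
            simp at this ⊢; tauto
      · obtain ⟨t, h1, h2, h3, h4, h5⟩ := ih st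
        have hstep : wlScan (kv :: F) c st = wlScan F c st := by
          simp only [wlScan, List.foldl_cons, if_neg hc]
        refine ⟨t, hstep ▸ h1, h2, ?_, ?_, ?_⟩
        · intro x hx
          exact ⟨(h3 x hx).1, by have := (h3 x hx).2; simp at this ⊢; tauto⟩
        · intro D hD hcl x hx
          exact h4 D hD (fun p hp => hcl p (by simp [hp])) x hx
        · intro p hp hcp hprem
          rcases List.mem_cons.1 hp with rfl | hp
          · exfalso
            apply hc
            refine (Bool.and_eq_true _ _).mpr ⟨by simpa using hcp, ?_⟩
            refine List.all_eq_true.2 ?_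
            intro a ha; simpa using hprem a ha
          · exact h5 p hp hcp hprem

lemma wlSeed_shape (F : List (String × String)) :
    ∀ st : List Char × List Char, ∃ t : List Char,
    wlSeed F st = (st.1 ++ t, st.2 ++ t)
    ∧ t.Nodup
    ∧ (∀ x ∈ t, x ∉ st.1 ∧ x ∈ F.flatMap (fun kv => kv.2.toList))
    ∧ (∀ D : Char → Prop, (∀ x ∈ st.1, D x) → ClosedPred F D → ∀ x ∈ t, D x)
    ∧ (∀ kv ∈ F, kv.1.toList = [] → ∀ x ∈ kv.2.toList, x ∈ st.1 ++ t) := by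
  induction F with
  | nil =>
      intro st
      exact ⟨[], by simp [wlSeed], by simp, by simp, by simp, by simp⟩
  | cons kv F ih =>
      intro st
      by_cases hc : kv.1.toList.isEmpty = true
      · obtain ⟨t0, g1, g2, g3, g4⟩ := wlFire_shape kv.2.toList st
        obtain ⟨t1, h1, h2, h3, h4, h5⟩ := ih (st.1 ++ t0, st.2 ++ t0)
        have hstep : wlSeed (kv :: F) st = wlSeed F (st.1 ++ t0, st.2 ++ t0) := by
          simp only [wlSeed, List.foldl_cons, if_pos hc, g1]
        refine ⟨t0 ++ t1, ?_, ?_, ?_, ?_, ?_⟩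
        · rw [hstep, h1]; simp
        · rw [List.nodup_append]
          refine ⟨g2, h2, ?_⟩
          intro a ha b hb e
          exact (h3 b hb).1 (by simp [← e, ha])
        · intro x hx
          rcases List.mem_append.1 hx with hx | hx
          · exact ⟨(g3 x hx).1, by simp; exact Or.inl (g3 x hx).2⟩
          · have hni := (h3 x hx).1
            refine ⟨fun hm => hni (by simp [hm]), ?_⟩
            have := (h3 x hx).2; simp at this ⊢; tauto
        · intro D hD hcl x hx
          have hclF : ClosedPred F D := fun p hp => hcl p (by simp [hp])
          have ht0 : ∀ x ∈ t0, D x := by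
            intro y hy
            have hvD : ∀ d ∈ kv.2.toList, D d := by
              refine hcl kv (by simp) ?_
              intro a ha
              rw [List.isEmpty_iff.1 hc] at ha
              simp at ha
            exact hvD y (g3 y hy).2
          rcases List.mem_append.1 hx with hx | hx
          · exact ht0 x hx
          · refine h4 D ?_ hclF x hx
            intro y hy
            rcases List.mem_append.1 hy with hy | hy
            · exact hD y hy
            · exact ht0 y hy
        · intro p hp hpe
          rcases List.mem_cons.1 hp with rfl | hp
          · intro x hx
            have := g4 x hx; simp at this ⊢; tauto
          · intro x hx
            have := h5 p hp hpe x hx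
            simp at this ⊢; tauto
      · obtain ⟨t, h1, h2, h3, h4, h5⟩ := ih st
        have hstep : wlSeed (kv :: F) st = wlSeed F st := by
          simp only [wlSeed, List.foldl_cons, if_neg hc]
        refine ⟨t, hstep ▸ h1, h2, ?_, ?_, ?_⟩
        · intro x hx
          exact ⟨(h3 x hx).1, by have := (h3 x hx).2; simp at this ⊢; tauto⟩
        · intro D hD hcl x hx
          exact h4 D hD (fun p hp => hcl p (by simp [hp])) x hx
        · intro p hp hpe
          rcases List.mem_cons.1 hp with rfl | hp
          · exact absurd (by simp [hpe]) hc
          · exact h5 p hp hpe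
-- the queue invariant: an FD whose lhs is in S with no lhs attribute still pending was applied
def WlInv (F : List (String × String)) (S q : List Char) : Prop :=
  ∀ kv ∈ F, (∀ a ∈ kv.1.toList, a ∈ S) → (∀ a ∈ kv.1.toList, a ∉ q) →
    ∀ c ∈ kv.2.toList, c ∈ S

lemma wl_main (F : List (String × String)) : ∀ (fuel : Nat) (S q : List Char),
    WlInv F S q →
    q.length + ((F.flatMap (fun kv => kv.2.toList)).toFinset \ S.toFinset).card < fuel →
    (∀ x ∈ S, x ∈ wlLoop F fuel (S, q)) ∧ ClosedList F (wlLoop F fuel (S, q)) ∧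
    (∀ D : Char → Prop, (∀ x ∈ S, D x) → ClosedPred F D → ∀ x ∈ wlLoop F fuel (S, q), D x) := by
  intro fuel
  induction fuel with
  | zero => intro S q _ h; omega
  | succ n ih =>
      intro S q hinv h
      match hq : q.getLast? with
      | none =>
          have hqnil : q = [] := by
            cases q with
            | nil => rfl
            | cons a q => simp at hq
          subst hqnil
          have hres : wlLoop F (n+1) (S, []) = S := by simp [wlLoop]
          rw [hres]
          refine ⟨fun x hx => hx, ?_, fun D hD _ => hD⟩
          intro kv hkv hprem c hc
          exact hinv kv hkv hprem (by simp) c hc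
      | some c =>
          have hqne : q ≠ [] := by intro e; subst e; simp at hq
          have hqsplit : q.dropLast ++ [c] = q := List.dropLast_append_getLast? c hq
          obtain ⟨t, g1, g2, g3, g4, g5⟩ := wlScan_shape F c (S, q.dropLast)
          have hres : wlLoop F (n+1) (S, q) = wlLoop F n (S ++ t, q.dropLast ++ t) := by
            simp only [wlLoop, hq, g1]
          -- new invariant
          have hinv' : WlInv F (S ++ t) (q.dropLast ++ t) := by
            intro kv hkv hprem hnq d hd
            have hkt : ∀ a ∈ kv.1.toList, a ∉ t := fun a ha hmem =>
              hnq a ha (by simp [hmem])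
            have hkS : ∀ a ∈ kv.1.toList, a ∈ S := by
              intro a ha
              rcases List.mem_append.1 (hprem a ha) with h' | h'
              · exact h'
              · exact absurd h' (hkt a ha)
            by_cases hck : c ∈ kv.1.toList
            · have := g5 kv hkv hck hkS d hd
              simpa using this
            · have hknq : ∀ a ∈ kv.1.toList, a ∉ q := by
                intro a ha hmem
                rw [← hqsplit] at hmem
                rcases List.mem_append.1 hmem with h' | h'
                · exact hnq a ha (by simp [h'])
                · simp at h'; subst h'; exact hck ha
              exact List.mem_append_left t (hinv kv hkv hkS hknq d hd)
          -- measure decreases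
          have hlen : q.dropLast.length + 1 = q.length := by
            rw [← hqsplit]; simp
          have htsub : t.toFinset ⊆ (F.flatMap (fun kv => kv.2.toList)).toFinset \ S.toFinset := by
            intro x hx
            rw [List.mem_toFinset] at hx
            rw [Finset.mem_sdiff, List.mem_toFinset, List.mem_toFinset]
            exact ⟨(g3 x hx).2, (g3 x hx).1⟩
          have hcard : ((F.flatMap (fun kv => kv.2.toList)).toFinset \ (S ++ t).toFinset).card
              = ((F.flatMap (fun kv => kv.2.toList)).toFinset \ S.toFinset).card - t.length := by
            have : (F.flatMap (fun kv => kv.2.toList)).toFinset \ (S ++ t).toFinset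
                = ((F.flatMap (fun kv => kv.2.toList)).toFinset \ S.toFinset) \ t.toFinset := by
              ext x; simp [List.mem_toFinset]; tauto
            rw [this, Finset.card_sdiff_of_subset htsub, List.toFinset_card_of_nodup g2]
          have hge := Finset.card_le_card htsub
          rw [List.toFinset_card_of_nodup g2] at hge
          have hm : (q.dropLast ++ t).length + ((F.flatMap (fun kv => kv.2.toList)).toFinset \ (S ++ t).toFinset).card < n := by
            rw [List.length_append, hcard]
            omega
          obtain ⟨m1, m2, m3⟩ := ih (S ++ t) (q.dropLast ++ t) hinv' hm
          rw [hres]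
          refine ⟨fun x hx => m1 x (by simp [hx]), m2, ?_⟩
          intro D hD hcl x hx
          refine m3 D ?_ hcl x hx
          intro y hy
          rcases List.mem_append.1 hy with hy | hy
          · exact hD y hy
          · exact g4 D hD hcl y hy
lemma closure_alt_mem (r : List Char) (F : List (String × String)) :
    ∀ c, c ∈ closure_alt r F ↔ Deriv r F c := by
  obtain ⟨t, g1, g2, g3, g4, g5⟩ := wlSeed_shape F (PySem.List.dedup r, PySem.List.dedup r)
  have hS0len : (PySem.List.dedup r).length ≤ r.length := by
    simp only [PySem.List.dedup_eq_ofList]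
    exact PySem.Set.length_ofList_le r
  -- initial invariant
  have hinv : WlInv F (PySem.List.dedup r ++ t) (PySem.List.dedup r ++ t) := by
    intro kv hkv hprem hnq d hd
    have hk : kv.1.toList = [] := by
      refine List.eq_nil_iff_forall_not_mem.2 ?_
      intro a ha
      exact hnq a ha (hprem a ha)
    have := g5 kv hkv hk d hd
    simpa using this
  -- measure bound
  have htsub : t.toFinset ⊆ (F.flatMap (fun kv => kv.2.toList)).toFinset \ (PySem.List.dedup r).toFinset := by
    intro x hx
    rw [List.mem_toFinset] at hx
    rw [Finset.mem_sdiff, List.mem_toFinset, List.mem_toFinset]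
    exact ⟨(g3 x hx).2, by simpa using (g3 x hx).1⟩
  have hcard : ((F.flatMap (fun kv => kv.2.toList)).toFinset \ (PySem.List.dedup r ++ t).toFinset).card
      = ((F.flatMap (fun kv => kv.2.toList)).toFinset \ (PySem.List.dedup r).toFinset).card - t.length := by
    have he : (F.flatMap (fun kv => kv.2.toList)).toFinset \ (PySem.List.dedup r ++ t).toFinset
        = ((F.flatMap (fun kv => kv.2.toList)).toFinset \ (PySem.List.dedup r).toFinset) \ t.toFinset := by
      ext x; simp [List.mem_toFinset]; tauto
    rw [he, Finset.card_sdiff_of_subset htsub, List.toFinset_card_of_nodup g2]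
  have hge := Finset.card_le_card htsub
  rw [List.toFinset_card_of_nodup g2] at hge
  have hcard2 : ((F.flatMap (fun kv => kv.2.toList)).toFinset \ (PySem.List.dedup r).toFinset).card
      ≤ (F.flatMap (fun kv => kv.2.toList)).length := by
    calc _ ≤ (F.flatMap (fun kv => kv.2.toList)).toFinset.card := Finset.card_le_card (Finset.sdiff_subset)
    _ ≤ _ := List.toFinset_card_le _
  have hm : (PySem.List.dedup r ++ t).length + ((F.flatMap (fun kv => kv.2.toList)).toFinset \ (PySem.List.dedup r ++ t).toFinset).card
      < r.length + (F.flatMap (fun kv => kv.2.toList)).length + 1 := by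
    rw [List.length_append, hcard]
    omega
  have hcl : closure_alt r F
      = wlLoop F (r.length + (F.flatMap (fun kv => kv.2.toList)).length + 1) (PySem.List.dedup r ++ t, PySem.List.dedup r ++ t) := by
    simp only [closure_alt, g1]
  obtain ⟨m1, m2, m3⟩ := wl_main F (r.length + (F.flatMap (fun kv => kv.2.toList)).length + 1)
    (PySem.List.dedup r ++ t) (PySem.List.dedup r ++ t) hinv hm
  intro c
  rw [hcl]
  constructor
  · intro hc
    refine m3 (Deriv r F) ?_ (Deriv_closedPred r F) c hc
    intro y hy
    rcases List.mem_append.1 hy with hy | hy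
    · exact Deriv.base (by simpa using (PySem.List.mem_dedup r y).1 hy)
    · exact g4 (Deriv r F) (fun x hx => Deriv.base ((PySem.List.mem_dedup r x).1 hx)) (Deriv_closedPred r F) y hy
  · intro hc
    refine Deriv_min (D := fun d => d ∈ wlLoop F (r.length + (F.flatMap (fun kv => kv.2.toList)).length + 1) (PySem.List.dedup r ++ t, PySem.List.dedup r ++ t)) m2 ?_ c hc
    intro x hx
    exact m1 x (List.mem_append_left t ((PySem.List.mem_dedup r x).2 hx))
-- pointwise equality of the lhs tests
lemma test_lhs_eq (Fc : List (String × String)) (k v : String) (a : Char) :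
    testLhs Fc k v a = !(lhsKeep Fc k v a) := by
  simp only [testLhs, lhsKeep, Bool.not_not]
  have hmem : ∀ c : Char,
      c ∈ attr_closure_port (PySem.Set.diff (PySem.Set.ofList k.toList) (PySem.Set.ofList [a])) Fc
      ↔ c ∈ closure_alt (k.toList.filter (fun x => decide (x ≠ a))) Fc := by
    intro c
    rw [attr_mem, closure_alt_mem]
    have hr : ∀ x : Char,
        x ∈ PySem.Set.diff (PySem.Set.ofList k.toList) (PySem.Set.ofList [a])
        ↔ x ∈ k.toList.filter (fun x => decide (x ≠ a)) := by
      intro x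
      rw [PySem.Set.mem_diff, PySem.Set.mem_ofList, PySem.Set.mem_ofList, List.mem_filter]
      simp
    have hid : ∀ kv ∈ Fc, ∃ kv' ∈ Fc, (∀ a ∈ kv'.1.toList, a ∈ kv.1.toList) ∧
        (∀ c ∈ kv.2.toList, c ∈ kv'.2.toList) :=
      fun kv hkv => ⟨kv, hkv, fun _ h => h, fun _ h => h⟩
    constructor
    · exact Deriv_mono (fun x hx => (hr x).1 hx) hid c
    · exact Deriv_mono (fun x hx => (hr x).2 hx) hid c
  refine List.all_congr rfl ?_
  intro c
  refine Bool.eq_iff_iff.2 ?_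
  rw [List.contains_iff_mem, List.contains_iff_mem]
  exact hmem c

-- pointwise equality of the rhs tests
lemma test_rhs_eq (Fc : List (String × String)) (k v : String) (b : Char) :
    testRhs Fc k v b = !(rhsKeep Fc k v b) := by
  simp only [testRhs, rhsKeep, Bool.not_not]
  refine Bool.eq_iff_iff.2 ?_
  rw [List.contains_iff_mem, List.contains_iff_mem, attr_mem, closure_alt_mem]
  have hrhs : ∀ c : Char,
      c ∈ (String.ofList (PySem.Set.diff (PySem.Set.ofList v.toList) (PySem.Set.ofList [b]))).toList
      ↔ c ∈ (String.ofList (v.toList.filter (fun x => decide (x ≠ b)))).toList := by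
    intro c
    rw [String.toList_ofList, String.toList_ofList, PySem.Set.mem_diff, PySem.Set.mem_ofList,
      PySem.Set.mem_ofList, List.mem_filter]
    simp
  have hFA : ∀ p : String × String,
      p ∈ (PySem.Set.union (PySem.Set.diff (PySem.Set.ofList Fc) (PySem.Set.ofList [(k, v)]))
        (PySem.Set.ofList [(k, String.ofList (PySem.Set.diff (PySem.Set.ofList v.toList) (PySem.Set.ofList [b])))]) : PySem.Set (String × String))
      ↔ (p ∈ Fc ∧ p ≠ (k, v)) ∨ p = (k, String.ofList (PySem.Set.diff (PySem.Set.ofList v.toList) (PySem.Set.ofList [b]))) := by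
    intro p
    rw [PySem.Set.mem_union, PySem.Set.mem_diff, PySem.Set.mem_ofList, PySem.Set.mem_ofList, PySem.Set.mem_ofList]
    simp
  have hFB : ∀ p : String × String,
      p ∈ Fc.filter (fun p => decide (p ≠ (k, v))) ++ [(k, String.ofList (v.toList.filter (fun x => decide (x ≠ b))))]
      ↔ (p ∈ Fc ∧ p ≠ (k, v)) ∨ p = (k, String.ofList (v.toList.filter (fun x => decide (x ≠ b)))) := by
    intro p
    rw [List.mem_append, List.mem_filter]
    simp
  constructor
  · refine Deriv_mono (fun x hx => hx) ?_ b
    intro kv hkv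
    rcases (hFA kv).1 hkv with h | h
    · exact ⟨kv, (hFB kv).2 (Or.inl h), fun _ h => h, fun _ h => h⟩
    · refine ⟨(k, String.ofList (v.toList.filter (fun x => decide (x ≠ b)))), (hFB _).2 (Or.inr rfl), ?_, ?_⟩
      · subst h; exact fun _ h => h
      · subst h; intro c hc; exact (hrhs c).1 hc
  · refine Deriv_mono (fun x hx => hx) ?_ b
    intro kv hkv
    rcases (hFB kv).1 hkv with h | h
    · exact ⟨kv, (hFA kv).2 (Or.inl h), fun _ h => h, fun _ h => h⟩
    · refine ⟨(k, String.ofList (PySem.Set.diff (PySem.Set.ofList v.toList) (PySem.Set.ofList [b]))), (hFA _).2 (Or.inr rfl), ?_, ?_⟩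
      · subst h; exact fun _ h => h
      · subst h; intro c hc; exact (hrhs c).2 hc
-- A's accumulate loop ('if not test: out += ch else: change = True') as filter + any
lemma pv_foldA (t : Char → Bool) : ∀ (l : List Char) (acc : List Char) (ch : Bool),
    l.foldl (fun (q : List Char × Bool) a =>
      if !(t a) then (q.1 ++ [a], q.2) else (q.1, true)) (acc, ch)
    = (acc ++ l.filter (fun a => !(t a)), ch || l.any t) := by
  intro l
  induction l with
  | nil => intro acc ch; simp
  | cons x l ih =>
      intro acc ch
      rw [List.foldl_cons]
      cases hx : t x
      · rw [if_pos (by simp [hx]), ih]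
        simp [hx]
      · rw [if_neg (by simp [hx]), ih]
        simp [hx]

-- change-flag: 'nk != k' equals 'some test fired'
lemma pv_flag (p : Char → Bool) (s : String) :
    decide (String.ofList (s.toList.filter p) ≠ s) = s.toList.any (fun a => !(p a)) := by
  refine Bool.eq_iff_iff.2 ?_
  rw [decide_eq_true_iff, List.any_eq_true]
  constructor
  · intro h
    by_contra hall
    push_neg at hall
    have : ∀ a ∈ s.toList, p a = true := by
      intro a ha
      have := hall a ha
      simpa using this
    rw [List.filter_eq_self.2 this, String.ofList_toList] at h
    exact h rfl
  · rintro ⟨a, ha, hpa⟩ h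
    have : (String.ofList (s.toList.filter p)).toList = s.toList := by rw [h]
    rw [String.toList_ofList] at this
    have := List.filter_eq_self.1 this a ha
    simp at hpa
    rw [hpa] at this
    simp at this

-- ===== VERDICT (by name: the statement is the Claim_ definition above) =====
theorem delete_extraneous_attr_spec : Claim_equal_delete_extraneous_attr := by
  intro Fc _
  unfold Spec_delete_extraneous_attr
  unfold delete_extraneous_attr delete_extraneous_attr_alt
  refine List.foldl_ext _ _ _ ?_
  intro st kv _
  simp only [pv_foldA (testLhs Fc kv.1 kv.2), pv_foldA (testRhs Fc kv.1 kv.2)]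
  have hL : ∀ a, (!(testLhs Fc kv.1 kv.2 a)) = lhsKeep Fc kv.1 kv.2 a := by
    intro a; rw [test_lhs_eq]; simp
  have hR : ∀ b, (!(testRhs Fc kv.1 kv.2 b)) = rhsKeep Fc kv.1 kv.2 b := by
    intro b; rw [test_rhs_eq]; simp
  have hfL : kv.1.toList.filter (fun a => !(testLhs Fc kv.1 kv.2 a))
      = kv.1.toList.filter (fun a => lhsKeep Fc kv.1 kv.2 a) :=
    List.filter_congr (fun a _ => hL a)
  have hfR : kv.2.toList.filter (fun b => !(testRhs Fc kv.1 kv.2 b))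
      = kv.2.toList.filter (fun b => rhsKeep Fc kv.1 kv.2 b) :=
    List.filter_congr (fun b _ => hR b)
  have haL : kv.1.toList.any (testLhs Fc kv.1 kv.2)
      = decide (String.ofList (kv.1.toList.filter (fun a => lhsKeep Fc kv.1 kv.2 a)) ≠ kv.1) := by
    rw [pv_flag (lhsKeep Fc kv.1 kv.2) kv.1]
    exact List.any_congr rfl (fun a => by rw [test_lhs_eq])
  have haR : kv.2.toList.any (testRhs Fc kv.1 kv.2)
      = decide (String.ofList (kv.2.toList.filter (fun b => rhsKeep Fc kv.1 kv.2 b)) ≠ kv.2) := by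
    rw [pv_flag (rhsKeep Fc kv.1 kv.2) kv.2]
    exact List.any_congr rfl (fun b => by rw [test_rhs_eq])
  simp only [List.nil_append, hfL, hfR, haL, haR]
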